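-- pv_equiv track=rewrite | github.com/HornedCoder/DSA | DivideAndConquer/numberFactor.py | noOfFactor
-- ===== SOURCE A (Python) =====
-- def noOfFactor(N):
--     if N in (0,1,2):
--         return 1
--     elif N == 3:
--         return 2
--     else:
--         sub1 = noOfFactor(N-1)
--         sub2 = noOfFactor(N-3)
--         sub3 = noOfFactor(N-4)
--
--     return sub1+sub2+sub3
-- ===== SOURCE B (Python) =====
-- def noOfFactor(N):
--     # Bottom-up DP: roll a window of the last four values of
--     # f(k) = f(k-1) + f(k-3) + f(k-4), f(0)=f(1)=f(2)=1, f(3)=2.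
--     if N < 3:
--         return 1
--     a, b, c, d = 1, 1, 1, 2
--     for _ in range(N - 3):
--         a, b, c, d = b, c, d, d + b + a
--     return d
-- ===== Notes on version B (the rewrite author's own statement) =====
-- stated objective: faster
-- what changed: Replaced the exponential triple recursion by a bottom-up DP that rolls a window of the last four values in one linear pass.
import Mathlib
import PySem

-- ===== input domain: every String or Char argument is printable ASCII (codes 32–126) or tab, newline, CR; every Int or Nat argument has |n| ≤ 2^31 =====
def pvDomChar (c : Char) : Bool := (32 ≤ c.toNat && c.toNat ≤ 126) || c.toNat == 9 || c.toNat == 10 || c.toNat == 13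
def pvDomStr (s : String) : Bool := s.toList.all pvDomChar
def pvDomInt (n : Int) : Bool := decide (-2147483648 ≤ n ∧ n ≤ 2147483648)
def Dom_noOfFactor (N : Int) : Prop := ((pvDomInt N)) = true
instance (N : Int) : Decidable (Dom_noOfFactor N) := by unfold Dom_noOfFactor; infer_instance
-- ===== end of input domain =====

-- B replaces A's exponential triple recursion by a linear bottom-up DP rolling the last four values.


-- ===== PORT A =====
def noOfFactor (N : Int) : Int :=
  if N = 0 ∨ N = 1 ∨ N = 2 then 1
  else if N = 3 then 2
  else if N < 0 then 0  -- totality guard only: Python recurses forever (RecursionError) here; outside Pre_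
  else
    let sub1 := noOfFactor (N-1)
    let sub2 := noOfFactor (N-3)
    let sub3 := noOfFactor (N-4)
    sub1 + sub2 + sub3
termination_by N.toNat
decreasing_by all_goals omega

-- ===== PORT B =====
def noOfFactor_alt (N : Int) : Int :=
  if N < 3 then 1
  else
    let s := (PySem.List.pyRange 0 (N - 3) 1).foldl
      (fun (s : Int × Int × Int × Int) _ => (s.2.1, s.2.2.1, s.2.2.2, s.2.2.2 + s.2.1 + s.1))
      (1, 1, 1, 2)
    s.2.2.2

-- ===== PRECONDITION & SPEC =====
-- Pre_: excludes negative N, on which Python A recurses without a base case and raises RecursionError.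
def Pre_noOfFactor (N : Int) : Prop := 0 ≤ N
instance (N : Int) : Decidable (Pre_noOfFactor N) := by unfold Pre_noOfFactor; infer_instance
def pvWitness_noOfFactor : Int := (7)

def Spec_noOfFactor (N : Int) (out : Int) : Prop := out = noOfFactor_alt N
instance (N : Int) (out : Int) : Decidable (Spec_noOfFactor N out) := by unfold Spec_noOfFactor; infer_instance

-- ===== CLAIM (what is proved, stated in full; the proofs are below) =====
def Claim_equal_noOfFactor : Prop := ∀ (N : Int), Dom_noOfFactor N → Pre_noOfFactor N → Spec_noOfFactor N (noOfFactor N)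

-- ===== LEMMAS AND PROOFS =====

-- reference sequence f(n) = f(n-1) + f(n-3) + f(n-4)
def pvF : Nat → Int
  | 0 => 1
  | 1 => 1
  | 2 => 1
  | 3 => 2
  | (n+4) => pvF (n+3) + pvF (n+1) + pvF n

def pvStep (s : Int × Int × Int × Int) : Int × Int × Int × Int :=
  (s.2.1, s.2.2.1, s.2.2.2, s.2.2.2 + s.2.1 + s.1)

lemma pvF_window (k : Nat) :
    (pvStep^[k]) (1, 1, 1, 2) = (pvF k, pvF (k+1), pvF (k+2), pvF (k+3)) := by
  induction k with
  | zero => simp [pvF]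
  | succ k ih =>
      rw [Function.iterate_succ_apply', ih]
      show (pvF (k+1), pvF (k+2), pvF (k+3), pvF (k+3) + pvF (k+1) + pvF k) = _
      rw [show k + 1 + 3 = k + 4 from rfl, pvF]

lemma noOfFactor_eq_pvF (n : Nat) : noOfFactor (n : Int) = pvF n := by
  induction n using Nat.strong_induction_on with
  | _ n ih =>
    match n with
    | 0 => rw [noOfFactor]; norm_num [pvF]
    | 1 => rw [noOfFactor]; norm_num [pvF]
    | 2 => rw [noOfFactor]; norm_num [pvF]
    | 3 => rw [noOfFactor]; norm_num [pvF]
    | (m+4) =>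
      rw [noOfFactor]
      have h0 : ¬((m:Int)+4 = 0 ∨ (m:Int)+4 = 1 ∨ (m:Int)+4 = 2) := by omega
      have h3 : ¬((m:Int)+4 = 3) := by omega
      have hn : ¬((m:Int)+4 < 0) := by omega
      push_cast
      simp only [h0, h3, hn, if_false]
      have e1 : (m:Int) + 4 - 1 = ((m+3 : Nat) : Int) := by omega
      have e2 : (m:Int) + 4 - 3 = ((m+1 : Nat) : Int) := by omega
      have e3 : (m:Int) + 4 - 4 = ((m : Nat) : Int) := by omega
      rw [e1, e2, e3, ih (m+3) (by omega), ih (m+1) (by omega), ih m (by omega), pvF]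

lemma foldl_pvStep (l : List Int) (s : Int × Int × Int × Int) :
    l.foldl (fun s _ => pvStep s) s = (pvStep^[l.length]) s := by
  induction l generalizing s with
  | nil => rfl
  | cons x xs ih => simp [List.foldl_cons, ih, Function.iterate_succ_apply]

lemma noOfFactor_alt_eq_pvF (n : Nat) : noOfFactor_alt (n : Int) = pvF n := by
  unfold noOfFactor_alt
  by_cases h : (n : Int) < 3
  · have hn : n < 3 := by omega
    interval_cases n <;> norm_num [pvF]
  · simp only [h, if_false]
    show ((PySem.List.pyRange 0 ((n:Int) - 3) 1).foldl (fun s _ => pvStep s) (1,1,1,2)).2.2.2 = _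
    rw [foldl_pvStep, PySem.List.length_pyRange_one, pvF_window]
    have : ((n:Int) - 3 - 0).toNat + 3 = n := by omega
    rw [this]

-- ===== VERDICT (by name: the statement is the Claim_ definition above) =====
theorem noOfFactor_spec : Claim_equal_noOfFactor := by
  intro N _ hpre
  unfold Pre_noOfFactor at hpre
  have ⟨n, hn⟩ : ∃ n : Nat, N = (n : Int) := ⟨N.toNat, by omega⟩
  unfold Spec_noOfFactor
  rw [hn, noOfFactor_eq_pvF, noOfFactor_alt_eq_pvF]
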